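-- pv_equiv track=rewrite | github.com/openkim/kim-tools | crystal_genome_util/aflow_util.py | get_formula_from_prototype
-- ===== SOURCE A (Python) =====
-- from typing import Dict, List, Tuple, Union
--
-- def get_formula_from_prototype(prototype_label: str) -> Tuple[str,int,int]:
--     """
--     Returns the stoichiometric formula, number of independent species in it,
--     and the number of atoms per formula by analyzing the stoichiometric prefix
--     in an AFLOW prototype label.
--
--     Args:
--         prototype_label :
--             AFLOW prototype label
--
--     Returns:
--         * The stoichimetric formula (e.g. `AB2C3`)
--         * Number of independent atoms in the stoichiometric formula (e.g. `AB2C3` has 3 independent species: `A`, `B` and `C`)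
--         * Number of independent atoms in the stoichiometric formula (e.g. `AB2C3` has 1 `A` + 2 `B` + 3 `C`  for 6 atoms in the formula)
--
--     """
--     # Verify that the number species matches the prototype
--     formula = prototype_label.split("_")[0]
--     letters = "".join([char for char in formula if not char.isdigit()])
--     number_independent_species = len(letters)
--
--     # Compute number of atoms per formula
--     number_atoms_per_formula = 0
--     for i in range(number_independent_species):
--         i1 = formula.index(letters[i])
--         if i < number_independent_species - 1:
--             i2 = formula.index(letters[i + 1])
--         else:
--             i2 = len(formula)
--         if i2 - i1 > 1:
--             number_atoms_per_formula += int(formula[i1 + 1 : i2])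
--         else:
--             number_atoms_per_formula += 1
--
--     # Return results
--     return formula, number_independent_species, number_atoms_per_formula
-- ===== SOURCE B (Python) =====
-- def get_formula_from_prototype(prototype_label):
--     """Single left-to-right scan over the formula prefix: each non-digit starts a
--     species and consumes its following digit run; no index() lookups, no rescans."""
--     formula = prototype_label.split("_")[0]
--     species = 0
--     atoms = 0
--     i = 0
--     n = len(formula)
--     while i < n:
--         if formula[i].isdigit():
--             i += 1  # leading digits precede any species; A ignores them too
--             continue
--         species += 1
--         j = i + 1
--         while j < n and formula[j].isdigit():
--             j += 1
--         atoms += int(formula[i + 1:j]) if j > i + 1 else 1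
--         i = j
--     return formula, species, atoms
-- ===== Notes on version B (the rewrite author's own statement) =====
-- stated objective: simpler
-- what changed: B replaces A's build-letters-then-index scheme (formula.index lookups per species plus re-slicing and re-parsing) with one left-to-right scan that counts each non-digit character and consumes its following digit run directly.
-- outside the precondition, e.g. on get_formula_from_prototype('AA'): A raises ValueError, B returns ('AA', 2, 2); on get_formula_from_prototype('--1'): A returns ('--1', 2, 0), B returns ('--1', 2, 2)
import Mathlib
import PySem

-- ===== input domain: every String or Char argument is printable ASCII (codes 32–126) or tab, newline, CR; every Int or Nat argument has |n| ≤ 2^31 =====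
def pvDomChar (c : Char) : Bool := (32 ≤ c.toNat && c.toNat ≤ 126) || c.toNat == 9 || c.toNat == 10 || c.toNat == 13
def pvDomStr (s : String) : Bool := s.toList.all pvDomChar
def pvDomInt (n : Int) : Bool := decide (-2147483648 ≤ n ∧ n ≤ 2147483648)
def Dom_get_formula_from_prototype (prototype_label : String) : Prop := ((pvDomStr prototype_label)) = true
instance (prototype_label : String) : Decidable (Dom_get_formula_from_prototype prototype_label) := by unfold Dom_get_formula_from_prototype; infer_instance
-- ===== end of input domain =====

-- B replaces A's per-species formula.index lookups and re-slicing with one left-to-right scan; objective: simpler.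

-- ===== PORT A =====
-- the body of A's 'for i in range(number_independent_species)' loop, over the character list f of formula
def pvLoopBody (f : List Char) (acc : Int) (i : Int) : Int :=
  let letters := f.filter (fun c => !PySem.Chars.isdigit c)
  let n : Int := letters.length
  -- i1 = formula.index(letters[i]); str.index of a 1-character string = first index of that character
  -- (always present, since letters comes from formula)
  let i1 : Int := ((PySem.List.index? f (PySem.List.pyGetD letters i ' ')).getD 0 : Int)
  let i2 : Int := if i < n - 1 then ((PySem.List.index? f (PySem.List.pyGetD letters (i+1) ' ')).getD 0 : Int)
                  else (f.length : Int)
  if i2 - i1 > 1 then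
    -- int(formula[i1+1:i2]); raises ValueError outside Pre_, where the port uses getD 0
    acc + (PySem.Int.ofChars? (PySem.List.slice f (some (i1+1)) (some i2))).getD 0
  else acc + 1

def get_formula_from_prototype (prototype_label : String) : String × Int × Int :=
  -- formula = prototype_label.split("_")[0]  (separator "_" ≠ "", so split? = some; split never returns [], so [0] exists)
  let formula : String := ((PySem.Str.split? prototype_label "_").getD []).headD ""
  let f : List Char := formula.toList
  -- letters = "".join([char for char in formula if not char.isdigit()])  (kept as its character list)
  let letters : List Char := f.filter (fun c => !PySem.Chars.isdigit c)
  let n : Int := letters.length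
  let atoms : Int := (PySem.List.pyRange 0 n 1).foldl (pvLoopBody f) 0
  (formula, n, atoms)

-- ===== PORT B =====
-- Source B's outer while loop: each non-digit char starts a species; the inner while loop walking j over
-- the following digit run is this takeWhile/dropWhile pair; int(formula[i+1:j]) is ofChars? of that
-- run (non-empty digits there, so int() never raises in B)
def pvScan : List Char → Int × Int
  | [] => (0, 0)
  | c :: t =>
    if PySem.Chars.isdigit c then pvScan t
    else
      let r := t.takeWhile (fun d => PySem.Chars.isdigit d)
      let p := pvScan (t.dropWhile (fun d => PySem.Chars.isdigit d))
      (p.1 + 1, p.2 + (if r.isEmpty then 1 else (PySem.Int.ofChars? r).getD 0))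
termination_by l => l.length
decreasing_by
  · simp
  · have := List.length_dropWhile_le (fun d => PySem.Chars.isdigit d) t
    simp; omega

def get_formula_from_prototype_alt (prototype_label : String) : String × Int × Int :=
  let formula : String := ((PySem.Str.split? prototype_label "_").getD []).headD ""
  let p := pvScan formula.toList
  (formula, p.1, p.2)

-- ===== PRECONDITION & SPEC =====
-- Pre_ excludes prototype labels whose formula prefix repeats a non-digit character: there A's
-- first-occurrence .index lookups slice accidental substrings, usually raising ValueError inside
-- int() and occasionally returning accidental values (int() also parsing signs/whitespace).
def Pre_get_formula_from_prototype (prototype_label : String) : Prop :=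
  ((((PySem.Str.split? prototype_label "_").getD []).headD "").toList.filter
      (fun c => !PySem.Chars.isdigit c)).Nodup
instance (prototype_label : String) : Decidable (Pre_get_formula_from_prototype prototype_label) := by
  unfold Pre_get_formula_from_prototype; infer_instance

def pvWitness_get_formula_from_prototype : String := "AB2C3_tP6_123"

def Spec_get_formula_from_prototype (prototype_label : String) (out : String × Int × Int) : Prop := out = get_formula_from_prototype_alt prototype_label
instance (prototype_label : String) (out : String × Int × Int) : Decidable (Spec_get_formula_from_prototype prototype_label out) := by unfold Spec_get_formula_from_prototype; infer_instance

-- ===== CLAIM (what is proved, stated in full; the proofs are below) =====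
def Claim_equal_get_formula_from_prototype : Prop := ∀ (prototype_label : String), Dom_get_formula_from_prototype prototype_label → Pre_get_formula_from_prototype prototype_label → Spec_get_formula_from_prototype prototype_label (get_formula_from_prototype prototype_label)

-- ===== LEMMAS AND PROOFS =====

-- the amount A's loop body adds at loop index j, restated over Nat indices
def pvTN (f : List Char) (j : Nat) : Int :=
  let L := f.filter (fun c => !PySem.Chars.isdigit c)
  let a := (PySem.List.index? f (L.getD j ' ')).getD 0
  let b := if j + 1 < L.length then (PySem.List.index? f (L.getD (j+1) ' ')).getD 0 else f.length
  if a + 1 < b then (PySem.Int.ofChars? ((f.drop (a+1)).take (b - (a+1)))).getD 0 else 1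

theorem pv_index_append_shift (pre rest : List Char) (x : Char) (hnx : x ∉ pre) :
    PySem.List.index? (pre ++ rest) x = (PySem.List.index? rest x).map (pre.length + ·) := by
  induction pre with
  | nil =>
    rw [List.nil_append]
    cases h : PySem.List.index? rest x <;> simp
  | cons p ps ih =>
    rw [List.cons_append, PySem.List.index?_cons_of_ne _ (fun h => hnx (by simp [h])),
      ih (fun h => hnx (List.mem_cons_of_mem _ h))]
    cases h : PySem.List.index? rest x
    · simp
    · simp
      omega

theorem pvTN_shift (pre rest : List Char) (j : Nat)
    (hj : j < (rest.filter (fun c => !PySem.Chars.isdigit c)).length)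
    (hdisj : ∀ x ∈ rest.filter (fun c => !PySem.Chars.isdigit c), x ∉ pre) :
    pvTN (pre ++ rest) ((pre.filter (fun c => !PySem.Chars.isdigit c)).length + j) = pvTN rest j := by
  have hL : (pre ++ rest).filter (fun c => !PySem.Chars.isdigit c)
      = pre.filter (fun c => !PySem.Chars.isdigit c) ++ rest.filter (fun c => !PySem.Chars.isdigit c) :=
    List.filter_append pre rest
  simp only [pvTN, hL]
  have hmemx : ∀ (m : Nat), m < (rest.filter (fun c => !PySem.Chars.isdigit c)).length →
      (rest.filter (fun c => !PySem.Chars.isdigit c)).getD m ' ' ∈ rest.filter (fun c => !PySem.Chars.isdigit c) := by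
    intro m hm
    rw [List.getD_eq_getElem _ _ hm]
    exact List.getElem_mem _
  have hgetD : ∀ (m : Nat),
      (pre.filter (fun c => !PySem.Chars.isdigit c) ++ rest.filter (fun c => !PySem.Chars.isdigit c)).getD
          ((pre.filter (fun c => !PySem.Chars.isdigit c)).length + m) ' '
        = (rest.filter (fun c => !PySem.Chars.isdigit c)).getD m ' ' := by
    intro m
    rw [List.getD_append_right _ _ _ _ (Nat.le_add_right _ _)]
    congr 1
    omega
  have hidx : ∀ (m : Nat), m < (rest.filter (fun c => !PySem.Chars.isdigit c)).length →
      (PySem.List.index? (pre ++ rest) ((rest.filter (fun c => !PySem.Chars.isdigit c)).getD m ' ')).getD 0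
        = pre.length + (PySem.List.index? rest ((rest.filter (fun c => !PySem.Chars.isdigit c)).getD m ' ')).getD 0 := by
    intro m hm
    have hmem := hmemx m hm
    have hxin : (rest.filter (fun c => !PySem.Chars.isdigit c)).getD m ' ' ∈ rest := List.mem_of_mem_filter hmem
    rw [pv_index_append_shift pre rest _ (hdisj _ hmem)]
    obtain ⟨a, ha⟩ := Option.isSome_iff_exists.mp ((PySem.List.index?_isSome_iff rest _).mpr hxin)
    rw [ha]
    rfl
  rw [hgetD j, hidx j hj]
  have e1 : ((pre.filter (fun c => !PySem.Chars.isdigit c)).length + j + 1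
      < (pre.filter (fun c => !PySem.Chars.isdigit c) ++ rest.filter (fun c => !PySem.Chars.isdigit c)).length)
      = (j + 1 < (rest.filter (fun c => !PySem.Chars.isdigit c)).length) := by
    rw [List.length_append]
    exact propext (by omega)
  simp only [e1]
  by_cases hb : j + 1 < (rest.filter (fun c => !PySem.Chars.isdigit c)).length
  · rw [if_pos hb, if_pos hb,
      show (pre.filter (fun c => !PySem.Chars.isdigit c)).length + j + 1
        = (pre.filter (fun c => !PySem.Chars.isdigit c)).length + (j+1) by omega,
      hgetD (j+1), hidx (j+1) hb]
    have e2 : (pre.length + (PySem.List.index? rest ((rest.filter (fun c => !PySem.Chars.isdigit c)).getD j ' ')).getD 0 + 1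
        < pre.length + (PySem.List.index? rest ((rest.filter (fun c => !PySem.Chars.isdigit c)).getD (j+1) ' ')).getD 0)
        = ((PySem.List.index? rest ((rest.filter (fun c => !PySem.Chars.isdigit c)).getD j ' ')).getD 0 + 1
        < (PySem.List.index? rest ((rest.filter (fun c => !PySem.Chars.isdigit c)).getD (j+1) ' ')).getD 0) := propext (by omega)
    simp only [e2]
    by_cases hc : (PySem.List.index? rest ((rest.filter (fun c => !PySem.Chars.isdigit c)).getD j ' ')).getD 0 + 1
        < (PySem.List.index? rest ((rest.filter (fun c => !PySem.Chars.isdigit c)).getD (j+1) ' ')).getD 0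
    · rw [if_pos hc, if_pos hc,
        show pre.length + (PySem.List.index? rest ((rest.filter (fun c => !PySem.Chars.isdigit c)).getD j ' ')).getD 0 + 1
          = pre.length + ((PySem.List.index? rest ((rest.filter (fun c => !PySem.Chars.isdigit c)).getD j ' ')).getD 0 + 1) by omega,
        List.drop_append]
      rw [List.drop_of_length_le (l := pre) (by omega), List.nil_append,
        Nat.add_sub_cancel_left, Nat.add_sub_add_left]
    · rw [if_neg hc, if_neg hc]
  · rw [if_neg hb, if_neg hb]
    have e2 : (pre.length + (PySem.List.index? rest ((rest.filter (fun c => !PySem.Chars.isdigit c)).getD j ' ')).getD 0 + 1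
        < (pre ++ rest).length)
        = ((PySem.List.index? rest ((rest.filter (fun c => !PySem.Chars.isdigit c)).getD j ' ')).getD 0 + 1
        < rest.length) := by
      rw [List.length_append]
      exact propext (by omega)
    simp only [e2]
    by_cases hc : (PySem.List.index? rest ((rest.filter (fun c => !PySem.Chars.isdigit c)).getD j ' ')).getD 0 + 1 < rest.length
    · rw [if_pos hc, if_pos hc,
        show pre.length + (PySem.List.index? rest ((rest.filter (fun c => !PySem.Chars.isdigit c)).getD j ' ')).getD 0 + 1
          = pre.length + ((PySem.List.index? rest ((rest.filter (fun c => !PySem.Chars.isdigit c)).getD j ' ')).getD 0 + 1) by omega,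
        List.drop_append]
      rw [List.drop_of_length_le (l := pre) (by omega), List.nil_append,
        Nat.add_sub_cancel_left, List.length_append, Nat.add_sub_add_left]
    · rw [if_neg hc, if_neg hc]

theorem pvLoopBody_eq (f : List Char) (acc : Int) (j : Nat)
    (hj : j < (f.filter (fun c => !PySem.Chars.isdigit c)).length) :
    pvLoopBody f acc (j : Int) = acc + pvTN f j := by
  simp only [pvLoopBody, pvTN]
  rw [PySem.List.pyGetD_natCast,
    show ((j : Int) + 1) = ((j + 1 : Nat) : Int) by push_cast; ring,
    PySem.List.pyGetD_natCast]
  have e1 : ((j : Int) < ((f.filter (fun c => !PySem.Chars.isdigit c)).length : Int) - 1)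
      = (j + 1 < (f.filter (fun c => !PySem.Chars.isdigit c)).length) := propext (by omega)
  simp only [e1]
  by_cases hb : j + 1 < (f.filter (fun c => !PySem.Chars.isdigit c)).length
  · rw [if_pos hb, if_pos hb]
    set a := (PySem.List.index? f ((f.filter (fun c => !PySem.Chars.isdigit c)).getD j ' ')).getD 0 with ha
    set b := (PySem.List.index? f ((f.filter (fun c => !PySem.Chars.isdigit c)).getD (j+1) ' ')).getD 0 with hbv
    have e2 : (((b : Int)) - ((a : Int)) > 1) = (a + 1 < b) := propext (by omega)
    simp only [e2]
    by_cases hc : a + 1 < b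
    · rw [if_pos hc, if_pos hc,
        show ((a : Int) + 1) = ((a + 1 : Nat) : Int) by push_cast; ring,
        PySem.List.slice_natCast]
    · rw [if_neg hc, if_neg hc]
  · rw [if_neg hb, if_neg hb]
    set a := (PySem.List.index? f ((f.filter (fun c => !PySem.Chars.isdigit c)).getD j ' ')).getD 0 with ha
    have e2 : (((f.length : Int)) - ((a : Int)) > 1) = (a + 1 < f.length) := propext (by omega)
    simp only [e2]
    by_cases hc : a + 1 < f.length
    · rw [if_pos hc, if_pos hc,
        show ((a : Int) + 1) = ((a + 1 : Nat) : Int) by push_cast; ring,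
        PySem.List.slice_natCast]
    · rw [if_neg hc, if_neg hc]

theorem pv_filter_digit_prefix (r rest : List Char) (h : ∀ a ∈ r, PySem.Chars.isdigit a = true) :
    (r ++ rest).filter (fun c => !PySem.Chars.isdigit c)
      = rest.filter (fun c => !PySem.Chars.isdigit c) := by
  rw [List.filter_append, List.filter_eq_nil_iff.mpr (by intro a ha; simp [h a ha]), List.nil_append]

theorem pvScan_digit (c : Char) (t : List Char) (hc : PySem.Chars.isdigit c = true) :
    pvScan (c :: t) = pvScan t := by
  rw [pvScan]
  simp [hc]

theorem pvScan_letter (c : Char) (t : List Char) (hc : PySem.Chars.isdigit c = false) :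
    pvScan (c :: t) = ((pvScan (t.dropWhile (fun d => PySem.Chars.isdigit d))).1 + 1,
      (pvScan (t.dropWhile (fun d => PySem.Chars.isdigit d))).2 +
        (if (t.takeWhile (fun d => PySem.Chars.isdigit d)).isEmpty then 1
         else (PySem.Int.ofChars? (t.takeWhile (fun d => PySem.Chars.isdigit d))).getD 0)) := by
  rw [pvScan]
  simp [hc]

theorem pvScan_fst (N : Nat) : ∀ (f : List Char), f.length ≤ N →
    (pvScan f).1 = ((f.filter (fun c => !PySem.Chars.isdigit c)).length : Int) := by
  induction N with
  | zero =>
    intro f hf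
    have hf0 : f = [] := List.eq_nil_of_length_eq_zero (Nat.le_zero.mp hf)
    subst hf0
    simp [pvScan]
  | succ N ih =>
    intro f hf
    match f with
    | [] => simp [pvScan]
    | c :: t =>
      by_cases hc : PySem.Chars.isdigit c
      · rw [pvScan_digit c t hc, List.filter_cons_of_neg (by simp [hc])]
        exact ih t (by simpa using Nat.le_of_succ_le_succ (by simpa using hf))
      · have hc' : PySem.Chars.isdigit c = false := by simpa using hc
        rw [pvScan_letter c t hc', List.filter_cons_of_pos (by simp [hc'])]
        have htr : t.takeWhile (fun d => PySem.Chars.isdigit d) ++ t.dropWhile (fun d => PySem.Chars.isdigit d) = t :=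
          List.takeWhile_append_dropWhile
        have hfil_t : t.filter (fun c => !PySem.Chars.isdigit c)
            = (t.dropWhile (fun d => PySem.Chars.isdigit d)).filter (fun c => !PySem.Chars.isdigit c) := by
          conv_lhs => rw [← htr]
          exact pv_filter_digit_prefix _ _ (fun a ha => List.mem_takeWhile_imp ha)
        have hdrop : (t.dropWhile (fun d => PySem.Chars.isdigit d)).length ≤ N := by
          have h1 := List.length_dropWhile_le (fun d => PySem.Chars.isdigit d) t
          have h2 : t.length ≤ N := by simpa using Nat.le_of_succ_le_succ (by simpa using hf)
          omega
        rw [hfil_t, ih _ hdrop]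
        push_cast
        simp

theorem pvTN_head (c : Char) (t : List Char) (hc : PySem.Chars.isdigit c = false)
    (hct : c ∉ t.filter (fun x => !PySem.Chars.isdigit x)) :
    pvTN (c :: t) 0 = if (t.takeWhile (fun d => PySem.Chars.isdigit d)).isEmpty then 1
      else (PySem.Int.ofChars? (t.takeWhile (fun d => PySem.Chars.isdigit d))).getD 0 := by
  have htr : t.takeWhile (fun d => PySem.Chars.isdigit d) ++ t.dropWhile (fun d => PySem.Chars.isdigit d) = t :=
    List.takeWhile_append_dropWhile
  have hallr : ∀ a ∈ t.takeWhile (fun d => PySem.Chars.isdigit d), PySem.Chars.isdigit a = true :=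
    fun a ha => List.mem_takeWhile_imp ha
  have hfil_t : t.filter (fun x => !PySem.Chars.isdigit x)
      = (t.dropWhile (fun d => PySem.Chars.isdigit d)).filter (fun x => !PySem.Chars.isdigit x) := by
    conv_lhs => rw [← htr]
    exact pv_filter_digit_prefix _ _ hallr
  have hfil : (c :: t).filter (fun x => !PySem.Chars.isdigit x)
      = c :: (t.dropWhile (fun d => PySem.Chars.isdigit d)).filter (fun x => !PySem.Chars.isdigit x) := by
    rw [List.filter_cons_of_pos (by simp [hc]), hfil_t]
  simp only [pvTN, hfil]
  rw [show ((c :: (t.dropWhile (fun d => PySem.Chars.isdigit d)).filter (fun x => !PySem.Chars.isdigit x)).getD 0 ' ') = c from rfl,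
    PySem.List.index?_cons_self]
  cases hrest : t.dropWhile (fun d => PySem.Chars.isdigit d) with
  | nil =>
    have ht := htr
    rw [hrest, List.append_nil] at ht
    simp only [List.filter_nil, List.length_cons, List.length_nil]
    rw [if_neg (show ¬(0 + 1 < 0 + 1) by omega)]
    have e2 : ((some 0).getD 0 + 1 < t.length + 1)
        = (0 < t.length) := by
      simp only [Option.getD_some]
      exact propext (by omega)
    simp only [e2]
    by_cases h0 : 0 < t.length
    · rw [if_pos h0, if_neg (by intro hne; rw [List.isEmpty_iff] at hne; rw [ht] at hne; simp [hne] at h0)]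
      congr 1
      simp only [Option.getD_some, Nat.zero_add, Nat.add_sub_cancel, List.drop_one,
        List.tail_cons, ht]
      rw [List.take_length]
    · rw [if_neg h0]
      have ht0 : t = [] := by
        cases t with
        | nil => rfl
        | cons a b => simp at h0
      rw [if_pos (by rw [ht, ht0]; rfl)]
  | cons h1 t2 =>
    have hne : t.dropWhile (fun d => PySem.Chars.isdigit d) ≠ [] := by rw [hrest]; simp
    have hnd1 : PySem.Chars.isdigit h1 = false := by
      have hh := List.head_dropWhile_not (p := fun d => PySem.Chars.isdigit d) (l := t) hne
      rwa [show (t.dropWhile (fun d => PySem.Chars.isdigit d)).head hne = h1 by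
        simp only [hrest, List.head_cons]] at hh
    have hfil_rest : (h1 :: t2).filter (fun x => !PySem.Chars.isdigit x)
        = h1 :: t2.filter (fun x => !PySem.Chars.isdigit x) :=
      List.filter_cons_of_pos (by simp [hnd1])
    have hfil_t2 := hfil_t
    rw [hrest, hfil_rest] at hfil_t2
    have hch1 : c ≠ h1 := by
      intro h
      apply hct
      rw [hfil_t2, h]
      exact List.mem_cons_self
    have hnotinr : h1 ∉ t.takeWhile (fun d => PySem.Chars.isdigit d) := by
      intro hmem
      have := hallr h1 hmem
      rw [hnd1] at this
      exact Bool.noConfusion this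
    have hidx : PySem.List.index? (c :: t) h1
        = some ((t.takeWhile (fun d => PySem.Chars.isdigit d)).length + 1) := by
      conv_lhs => rw [← htr, hrest]
      rw [PySem.List.index?_cons_of_ne _ hch1, pv_index_append_shift _ _ _ hnotinr,
        PySem.List.index?_cons_self]
      simp
    rw [hfil_rest]
    simp only [List.length_cons]
    rw [if_pos (show 0 + 1 < (List.filter (fun x => !PySem.Chars.isdigit x) t2).length + 1 + 1 by omega),
      show ((c :: (h1 :: t2.filter (fun x => !PySem.Chars.isdigit x))).getD (0+1) ' ') = h1 from rfl,
      hidx]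
    have e2 : ((some 0).getD 0 + 1 < (some ((t.takeWhile (fun d => PySem.Chars.isdigit d)).length + 1)).getD 0)
        = (0 < (t.takeWhile (fun d => PySem.Chars.isdigit d)).length) := by
      simp only [Option.getD_some]
      exact propext (by omega)
    simp only [e2]
    by_cases h0 : 0 < (t.takeWhile (fun d => PySem.Chars.isdigit d)).length
    · rw [if_pos h0, if_neg (by intro hne2; rw [List.isEmpty_iff] at hne2; simp [hne2] at h0)]
      congr 1
      simp only [Option.getD_some, Nat.zero_add, Nat.add_sub_cancel, List.drop_one, List.tail_cons]
      set L := List.takeWhile (fun d => PySem.Chars.isdigit d) t with hL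
      rw [← htr, hrest, List.take_left]
    · rw [if_neg h0, if_pos (by
        rw [List.isEmpty_iff]
        cases hte : t.takeWhile (fun d => PySem.Chars.isdigit d) with
        | nil => rfl
        | cons a b => rw [hte] at h0; simp at h0)]

theorem pvAtoms (N : Nat) : ∀ (f : List Char), f.length ≤ N →
    (f.filter (fun c => !PySem.Chars.isdigit c)).Nodup →
    ((List.range (f.filter (fun c => !PySem.Chars.isdigit c)).length).map (fun j => pvTN f j)).sum
      = (pvScan f).2 := by
  induction N with
  | zero =>
    intro f hf _
    have hf0 : f = [] := List.eq_nil_of_length_eq_zero (Nat.le_zero.mp hf)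
    subst hf0
    simp [pvScan]
  | succ N ih =>
    intro f hf hnd
    match f with
    | [] => simp [pvScan]
    | c :: t =>
      have hlen : t.length ≤ N := by simpa using Nat.le_of_succ_le_succ (by simpa using hf)
      by_cases hc : PySem.Chars.isdigit c
      · have hfil : (c :: t).filter (fun x => !PySem.Chars.isdigit x)
            = t.filter (fun x => !PySem.Chars.isdigit x) :=
          List.filter_cons_of_neg (by simp [hc])
        rw [pvScan_digit c t hc, hfil]
        rw [hfil] at hnd
        have hmap : ∀ j ∈ List.range (t.filter (fun x => !PySem.Chars.isdigit x)).length,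
            pvTN (c :: t) j = pvTN t j := by
          intro j hj
          rw [List.mem_range] at hj
          have hdisj : ∀ x ∈ t.filter (fun x => !PySem.Chars.isdigit x), x ∉ [c] := by
            intro x hx hxc
            have hx' := (List.mem_filter.mp hx).2
            rw [List.mem_singleton] at hxc
            subst hxc
            simp [hc] at hx'
          have hsh := pvTN_shift [c] t j hj hdisj
          rw [List.singleton_append] at hsh
          rwa [show (List.filter (fun c => !PySem.Chars.isdigit c) [c]).length = 0 by simp [hc],
            Nat.zero_add] at hsh
        rw [List.map_congr_left hmap]
        exact ih t hlen hnd
      · have hc' : PySem.Chars.isdigit c = false := by simpa using hc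
        have htr : t.takeWhile (fun d => PySem.Chars.isdigit d) ++ t.dropWhile (fun d => PySem.Chars.isdigit d) = t :=
          List.takeWhile_append_dropWhile
        have hallr : ∀ a ∈ t.takeWhile (fun d => PySem.Chars.isdigit d), PySem.Chars.isdigit a = true :=
          fun a ha => List.mem_takeWhile_imp ha
        have hfil_t : t.filter (fun x => !PySem.Chars.isdigit x)
            = (t.dropWhile (fun d => PySem.Chars.isdigit d)).filter (fun x => !PySem.Chars.isdigit x) := by
          conv_lhs => rw [← htr]
          exact pv_filter_digit_prefix _ _ hallr
        have hfil : (c :: t).filter (fun x => !PySem.Chars.isdigit x)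
            = c :: (t.dropWhile (fun d => PySem.Chars.isdigit d)).filter (fun x => !PySem.Chars.isdigit x) := by
          rw [List.filter_cons_of_pos (by simp [hc']), hfil_t]
        rw [hfil] at hnd
        obtain ⟨hcR, hndR⟩ := List.nodup_cons.mp hnd
        have hct : c ∉ t.filter (fun x => !PySem.Chars.isdigit x) := by
          rw [hfil_t]; exact hcR
        have hdlen : (t.dropWhile (fun d => PySem.Chars.isdigit d)).length ≤ N := by
          have := List.length_dropWhile_le (fun d => PySem.Chars.isdigit d) t
          omega
        rw [pvScan_letter c t hc', hfil]
        simp only [List.length_cons, List.range_succ_eq_map, List.map_cons, List.map_map,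
          List.sum_cons]
        rw [pvTN_head c t hc' hct]
        have hmap : ∀ j ∈ List.range ((t.dropWhile (fun d => PySem.Chars.isdigit d)).filter
            (fun x => !PySem.Chars.isdigit x)).length,
            ((fun j => pvTN (c :: t) j) ∘ Nat.succ) j
              = pvTN (t.dropWhile (fun d => PySem.Chars.isdigit d)) j := by
          intro j hj
          rw [List.mem_range] at hj
          have hdisj : ∀ x ∈ (t.dropWhile (fun d => PySem.Chars.isdigit d)).filter
              (fun x => !PySem.Chars.isdigit x),
              x ∉ c :: t.takeWhile (fun d => PySem.Chars.isdigit d) := by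
            intro x hx hxm
            rcases List.mem_cons.mp hxm with h | h
            · exact hcR (h ▸ hx)
            · have hxd := hallr x h
              have hx' := (List.mem_filter.mp hx).2
              rw [hxd] at hx'
              exact Bool.noConfusion hx'
          have hsh := pvTN_shift (c :: t.takeWhile (fun d => PySem.Chars.isdigit d))
            (t.dropWhile (fun d => PySem.Chars.isdigit d)) j hj hdisj
          rw [List.cons_append, htr] at hsh
          have h1 : List.filter (fun x => !PySem.Chars.isdigit x)
              (c :: t.takeWhile (fun d => PySem.Chars.isdigit d)) = [c] := by
            rw [List.filter_cons_of_pos (by simp [hc']),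
              List.filter_eq_nil_iff.mpr (by intro a ha; simp [hallr a ha])]
          have hlen1 : (List.filter (fun x => !PySem.Chars.isdigit x)
              (c :: t.takeWhile (fun d => PySem.Chars.isdigit d))).length = 1 := by
            simp [h1]
          rw [hlen1, Nat.add_comm 1 j] at hsh
          simpa using hsh
        rw [List.map_congr_left hmap, ih _ hdlen hndR]
        ring


-- ===== VERDICT (by name: the statement is the Claim_ definition above) =====
theorem get_formula_from_prototype_spec : Claim_equal_get_formula_from_prototype := by
  intro s _ hpre
  unfold Pre_get_formula_from_prototype at hpre
  unfold Spec_get_formula_from_prototype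
  simp only [get_formula_from_prototype, get_formula_from_prototype_alt, Prod.mk.injEq]
  set FL := (((PySem.Str.split? s "_").getD []).headD "").toList with hFL
  refine ⟨trivial, ?_, ?_⟩
  · exact (pvScan_fst FL.length FL le_rfl).symm
  · have h1 : List.foldl (fun (x : Int) (y : Nat) => pvLoopBody FL x (y : Int)) 0
        (List.range (FL.filter (fun c => !PySem.Chars.isdigit c)).length)
        = List.foldl (fun (acc : Int) (j : Nat) => acc + pvTN FL j) 0
        (List.range (FL.filter (fun c => !PySem.Chars.isdigit c)).length) :=
      PySem.List.foldl_congr_mem _ _ _ _ (fun acc x hx => pvLoopBody_eq FL acc x (List.mem_range.mp hx))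
    rw [PySem.List.pyRange_zero, Int.toNat_natCast, List.foldl_map, h1,
      PySem.List.foldl_add, zero_add]
    exact pvAtoms FL.length FL le_rfl hpre
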